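-- pv_equiv track=rewrite | github.com/dahuilangda/Boltz2Score | utils/ligand_alignment.py | resolve_model_ligand_chain_id
-- ===== SOURCE A (Python) =====
-- def resolve_model_ligand_chain_id(
--     available_chain_ids: list[str],
--     requested_ligand_chain_id: str | None,
-- ) -> str:
--     if not available_chain_ids:
--         raise RuntimeError("No ligand chain found in output structure.")
--
--     if requested_ligand_chain_id:
--         requested = requested_ligand_chain_id.strip()
--         if requested:
--             requested_upper = requested.upper()
--             for chain_id in available_chain_ids:
--                 if chain_id.upper() == requested_upper:
--                     return chain_id
--             for chain_id in available_chain_ids: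
--                 chain_upper = chain_id.upper()
--                 if chain_upper.startswith(f"{requested_upper}X"):
--                     return chain_id
--                 if requested_upper.startswith(f"{chain_upper}X"):
--                     return chain_id
--
--     if len(available_chain_ids) == 1:
--         return available_chain_ids[0]
--
--     raise RuntimeError(
--         "Unable to resolve model ligand chain id uniquely. "
--         f"Available ligand chains: {available_chain_ids}. "
--         f"Requested chain: {requested_ligand_chain_id!r}."
--     )
-- ===== SOURCE B (Python) =====
-- def resolve_model_ligand_chain_id(
--     available_chain_ids: list[str],
--     requested_ligand_chain_id: str | None,
-- ) -> str:
--     if requested_ligand_chain_id: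
--         requested_upper = requested_ligand_chain_id.strip().upper()
--         if requested_upper:
--             pending = None
--             for chain_id in available_chain_ids:
--                 chain_upper = chain_id.upper()
--                 if chain_upper == requested_upper:
--                     return chain_id
--                 if pending is None and (
--                     chain_upper.startswith(requested_upper + "X")
--                     or requested_upper.startswith(chain_upper + "X")
--                 ):
--                     pending = chain_id
--             if pending is not None:
--                 return pending
--     if len(available_chain_ids) == 1:
--         return available_chain_ids[0]
--     raise RuntimeError(
--         "Unable to resolve model ligand chain id uniquely. "
--         f"Available ligand chains: {available_chain_ids}. "
--         f"Requested chain: {requested_ligand_chain_id!r}."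
--     )
-- ===== Notes on version B (the rewrite author's own statement) =====
-- stated objective: alternative
-- what changed: A's two sequential full scans (exact-match scan, then prefix-match scan) are folded into a single pass that returns an exact match immediately and remembers the first prefix-style match as a pending candidate returned only after the pass.
import Mathlib
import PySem

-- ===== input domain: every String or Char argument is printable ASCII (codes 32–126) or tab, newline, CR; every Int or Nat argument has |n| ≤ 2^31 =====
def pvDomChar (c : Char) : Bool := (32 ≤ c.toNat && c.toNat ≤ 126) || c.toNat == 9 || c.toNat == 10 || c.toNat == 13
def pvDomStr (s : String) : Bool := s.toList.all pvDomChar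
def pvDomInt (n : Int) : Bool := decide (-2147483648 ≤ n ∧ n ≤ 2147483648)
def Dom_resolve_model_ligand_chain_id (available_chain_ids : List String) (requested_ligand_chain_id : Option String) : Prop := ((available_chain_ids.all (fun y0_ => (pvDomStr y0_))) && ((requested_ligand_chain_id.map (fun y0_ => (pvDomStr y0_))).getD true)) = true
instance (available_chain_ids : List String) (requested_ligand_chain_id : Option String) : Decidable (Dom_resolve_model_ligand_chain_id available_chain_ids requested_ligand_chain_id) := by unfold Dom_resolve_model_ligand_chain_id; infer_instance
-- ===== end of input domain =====

-- B folds A's two sequential scans into a single pass that returns an exact match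
-- immediately and remembers the first prefix-style match as a pending candidate
-- (objective: alternative decomposition, one traversal instead of two).
-- Both Pythons raise RuntimeError on unresolvable inputs; those are outside Pre_.

-- ===== PORT A =====
-- the two match tests, shared verbatim by both Python versions
def pvExact (rU c : String) : Bool := PySem.Str.upper c == rU
def pvPref (rU c : String) : Bool :=
  PySem.Chars.startswith (PySem.Chars.upper c.toList) (rU.toList ++ ['X']) ||
  PySem.Chars.startswith rU.toList (PySem.Chars.upper c.toList ++ ['X'])

def resolve_model_ligand_chain_id (available_chain_ids : List String) (requested_ligand_chain_id : Option String) : String :=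
  if available_chain_ids.isEmpty then ""  -- Python raises RuntimeError here; outside Pre_
  else
    let viaReq : Option String :=
      match requested_ligand_chain_id with
      | none => none
      | some s =>
        if s ≠ "" then
          let requested := PySem.Str.strip s
          if requested ≠ "" then
            let requested_upper := PySem.Str.upper requested
            match available_chain_ids.find? (fun c => pvExact requested_upper c) with
            | some c => some c
            | none => available_chain_ids.find? (fun c => pvPref requested_upper c)
          else none
        else none
    match viaReq with
    | some c => c
    | none =>
      if available_chain_ids.length = 1 then available_chain_ids.headD ""
      else ""  -- Python raises RuntimeError here; outside Pre_

-- ===== PORT B =====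
-- single pass: exact match returns at once, first prefix match is kept pending
def pvAltLoop (rU : String) : List String → Option String → Option String
  | [], pending => pending
  | c :: rest, pending =>
    if pvExact rU c then some c
    else if pending.isNone && pvPref rU c then pvAltLoop rU rest (some c)
    else pvAltLoop rU rest pending

def resolve_model_ligand_chain_id_alt (available_chain_ids : List String) (requested_ligand_chain_id : Option String) : String :=
  let viaReq : Option String :=
    match requested_ligand_chain_id with
    | none => none
    | some s =>
      if s ≠ "" then
        let requested_upper := PySem.Str.upper (PySem.Str.strip s)
        if requested_upper ≠ "" then pvAltLoop requested_upper available_chain_ids none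
        else none
      else none
  match viaReq with
  | some c => c
  | none =>
    if available_chain_ids.length = 1 then available_chain_ids.headD ""
    else ""  -- Python raises RuntimeError here; outside Pre_

-- ===== PRECONDITION & SPEC =====
-- Pre_ excludes exactly the inputs where Python A raises RuntimeError: the
-- request resolves to no chain and the list does not have exactly one element.
def Pre_resolve_model_ligand_chain_id (available_chain_ids : List String) (requested_ligand_chain_id : Option String) : Prop :=
  available_chain_ids.length = 1 ∨
  ((requested_ligand_chain_id.map (fun s =>
      decide (PySem.Str.strip s ≠ "") &&
      available_chain_ids.any (fun c =>
        pvExact (PySem.Str.upper (PySem.Str.strip s)) c ||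
        pvPref (PySem.Str.upper (PySem.Str.strip s)) c))).getD false) = true
instance (available_chain_ids : List String) (requested_ligand_chain_id : Option String) : Decidable (Pre_resolve_model_ligand_chain_id available_chain_ids requested_ligand_chain_id) := by unfold Pre_resolve_model_ligand_chain_id; infer_instance

def pvWitness_resolve_model_ligand_chain_id : List String × Option String := (["L1", "B"], some " l1 ")

def Spec_resolve_model_ligand_chain_id (available_chain_ids : List String) (requested_ligand_chain_id : Option String) (out : String) : Prop := out = resolve_model_ligand_chain_id_alt available_chain_ids requested_ligand_chain_id
instance (available_chain_ids : List String) (requested_ligand_chain_id : Option String) (out : String) : Decidable (Spec_resolve_model_ligand_chain_id available_chain_ids requested_ligand_chain_id out) := by unfold Spec_resolve_model_ligand_chain_id; infer_instance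

-- ===== CLAIM (what is proved, stated in full; the proofs are below) =====
def Claim_equal_resolve_model_ligand_chain_id : Prop := ∀ (available_chain_ids : List String) (requested_ligand_chain_id : Option String), Dom_resolve_model_ligand_chain_id available_chain_ids requested_ligand_chain_id → Pre_resolve_model_ligand_chain_id available_chain_ids requested_ligand_chain_id → Spec_resolve_model_ligand_chain_id available_chain_ids requested_ligand_chain_id (resolve_model_ligand_chain_id available_chain_ids requested_ligand_chain_id)

-- ===== LEMMAS AND PROOFS =====

lemma pvAltLoop_some (rU p : String) (l : List String) :
    pvAltLoop rU l (some p) = some ((l.find? (fun c => pvExact rU c)).getD p) := by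
  induction l with
  | nil => rfl
  | cons c rest ih =>
    by_cases h : pvExact rU c
    · simp [pvAltLoop, List.find?, h]
    · simp [pvAltLoop, List.find?, h, ih]

lemma pvAltLoop_none (rU : String) (l : List String) :
    pvAltLoop rU l none =
      (match l.find? (fun c => pvExact rU c) with
       | some c => some c
       | none => l.find? (fun c => pvPref rU c)) := by
  induction l with
  | nil => rfl
  | cons c rest ih =>
    by_cases h : pvExact rU c
    · simp [pvAltLoop, List.find?, h]
    · by_cases hp : pvPref rU c
      · simp [pvAltLoop, List.find?, h, hp, pvAltLoop_some]
        rcases hfind : rest.find? (fun c => pvExact rU c) with _ | e <;> simp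
      · simp [pvAltLoop, List.find?, h, hp, ih]

lemma upper_ne_empty {s : String} (h : s ≠ "") : PySem.Str.upper s ≠ "" := by
  intro he
  apply h
  have h1 : (PySem.Str.upper s).toList = [] := by rw [he]; rfl
  rw [PySem.Str.toList_upper] at h1
  have h2 : s.toList = [] := by
    cases hs : s.toList with
    | nil => rfl
    | cons a t => rw [hs] at h1; simp [PySem.Chars.upper] at h1
  exact String.toList_inj.mp h2

lemma viaReq_eq (available_chain_ids : List String) (requested_ligand_chain_id : Option String) :
    (match requested_ligand_chain_id with
      | none => none
      | some s =>
        if s ≠ "" then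
          let requested := PySem.Str.strip s
          if requested ≠ "" then
            let requested_upper := PySem.Str.upper requested
            match available_chain_ids.find? (fun c => pvExact requested_upper c) with
            | some c => some c
            | none => available_chain_ids.find? (fun c => pvPref requested_upper c)
          else none
        else none)
    =
    (match requested_ligand_chain_id with
      | none => none
      | some s =>
        if s ≠ "" then
          let requested_upper := PySem.Str.upper (PySem.Str.strip s)
          if requested_upper ≠ "" then pvAltLoop requested_upper available_chain_ids none
          else none
        else none : Option String) := by
  cases requested_ligand_chain_id with
  | none => rfl
  | some s =>
    by_cases hs : s = ""
    · simp [hs]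
    · by_cases hr : PySem.Str.strip s = ""
      · have hu : PySem.Str.upper "" = "" := by decide
        simp [hs, hr, hu]
      · simp [hs, hr, upper_ne_empty hr, pvAltLoop_none]

-- ===== VERDICT (by name: the statement is the Claim_ definition above) =====
theorem resolve_model_ligand_chain_id_spec : Claim_equal_resolve_model_ligand_chain_id := by
  intro avail req _hDom hPre
  unfold Spec_resolve_model_ligand_chain_id
  unfold resolve_model_ligand_chain_id resolve_model_ligand_chain_id_alt
  by_cases hA : avail.isEmpty
  · exfalso
    have hnil : avail = [] := List.isEmpty_iff.mp hA
    subst hnil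
    rcases hPre with h1 | h2
    · simp at h1
    · cases req with
      | none => simp at h2
      | some s => simp at h2
  · simp only [hA, if_false, Bool.false_eq_true]
    rw [viaReq_eq avail req]
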